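-- pv_equiv track=rewrite | github.com/Runarok/GeeksForGeeks-solutions | Difficulty: Medium/Carpet into Box/carpet-into-box.py | carpetBox
-- ===== SOURCE A (Python) =====
-- def carpetBox(a, b, c, d):
--     # Function to calculate the number of moves required to fit the carpet in the box
--     def count_moves_to_fit(x, y, box_x, box_y):
--         moves = 0
--         # While the carpet does not fit inside the box
--         while x > box_x or y > box_y:
--             # If the carpet is too wide, fold it
--             if x > box_x:
--                 x //= 2
--             # If the carpet is too tall, fold it
--             elif y > box_y:
--                 y //= 2
--             # Increment the move count
--             moves += 1
--         return moves
--
--     # Try both orientations (a x b) and (b x a)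
--     moves_orientation_1 = count_moves_to_fit(a, b, c, d)
--     moves_orientation_2 = count_moves_to_fit(b, a, c, d)
--
--     # Return the minimum number of moves between both orientations
--     return min(moves_orientation_1, moves_orientation_2)
-- ===== SOURCE B (Python) =====
-- def carpetBox(a, b, c, d):
--     # Closed form: minimal k with v // 2**k <= t is (v // (t + 1)).bit_length()
--     def count(v, t):
--         return 0 if v <= t else (v // (t + 1)).bit_length()
--     return min(count(a, c) + count(b, d), count(b, c) + count(a, d))
-- ===== Notes on version B (the rewrite author's own statement) =====
-- stated objective: simpler
-- what changed: Replaces A's interleaved while-loop of repeated halvings with a per-dimension closed form: the fold count for one dimension is (v // (t+1)).bit_length() when v > t, so B is loop-free.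
import Mathlib
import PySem

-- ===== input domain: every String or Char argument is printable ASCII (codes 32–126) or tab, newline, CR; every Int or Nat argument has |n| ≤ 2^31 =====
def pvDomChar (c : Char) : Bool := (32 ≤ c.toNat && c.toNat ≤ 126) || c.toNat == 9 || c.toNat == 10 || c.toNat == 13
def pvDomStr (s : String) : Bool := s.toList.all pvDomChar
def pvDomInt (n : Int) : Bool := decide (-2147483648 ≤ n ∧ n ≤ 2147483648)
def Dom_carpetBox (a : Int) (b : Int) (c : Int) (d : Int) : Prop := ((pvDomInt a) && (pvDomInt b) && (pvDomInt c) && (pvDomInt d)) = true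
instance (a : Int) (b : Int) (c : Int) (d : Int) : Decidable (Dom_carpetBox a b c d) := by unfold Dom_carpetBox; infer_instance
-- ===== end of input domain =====

-- B replaces A's interleaved halving while-loop with a loop-free per-dimension closed form
-- (fold count = bit_length(v // (t+1)) when v > t); objective: simpler.

-- ===== PORT A =====
-- A's while-loop; the fuel argument only makes the recursion total: on every input
-- satisfying Pre_carpetBox (and Dom) far fewer than 128 iterations are needed, so the
-- fuel guard never fires there (proved by carpetBox_spec below).
def cmLoop : Nat → Int → Int → Int → Int → Int → Int
  | 0, _, _, _, _, moves => moves
  | fuel+1, x, y, bx, by_, moves =>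
    if x > bx ∨ y > by_ then
      if x > bx then
        cmLoop fuel (PySem.Int.floordiv x 2) y bx by_ (moves + 1)
      else
        cmLoop fuel x (PySem.Int.floordiv y 2) bx by_ (moves + 1)
    else moves

def countMovesToFit (x y bx by_ : Int) : Int := cmLoop 128 x y bx by_ 0

def carpetBox (a : Int) (b : Int) (c : Int) (d : Int) : Int :=
  min (countMovesToFit a b c d) (countMovesToFit b a c d)

-- ===== PORT B =====
def pyCount (v t : Int) : Int :=
  if v ≤ t then 0 else (PySem.Int.bitLength (PySem.Int.floordiv v (t + 1)) : Int)

def carpetBox_alt (a : Int) (b : Int) (c : Int) (d : Int) : Int :=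
  min (pyCount a c + pyCount b d) (pyCount b c + pyCount a d)

-- ===== PRECONDITION & SPEC =====
-- Pre_ is exactly the set of inputs on which Python A terminates: with a negative box side,
-- repeated floor-halving never drops a dimension below it and A loops forever.
def Pre_carpetBox (a : Int) (b : Int) (c : Int) (d : Int) : Prop :=
  (0 ≤ c ∨ (a ≤ c ∧ b ≤ c)) ∧ (0 ≤ d ∨ (a ≤ d ∧ b ≤ d))
instance (a : Int) (b : Int) (c : Int) (d : Int) : Decidable (Pre_carpetBox a b c d) := by
  unfold Pre_carpetBox; infer_instance

def pvWitness_carpetBox : Int × Int × Int × Int := (9, 7, 2, 3)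

def Spec_carpetBox (a : Int) (b : Int) (c : Int) (d : Int) (out : Int) : Prop := out = carpetBox_alt a b c d
instance (a : Int) (b : Int) (c : Int) (d : Int) (out : Int) : Decidable (Spec_carpetBox a b c d out) := by unfold Spec_carpetBox; infer_instance

-- ===== CLAIM (what is proved, stated in full; the proofs are below) =====
def Claim_equal_carpetBox : Prop := ∀ (a : Int) (b : Int) (c : Int) (d : Int), Dom_carpetBox a b c d → Pre_carpetBox a b c d → Spec_carpetBox a b c d (carpetBox a b c d)

-- ===== LEMMAS AND PROOFS =====

-- floor-divisions by positive divisors commute (on nonnegative dividends)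
theorem pv_floordiv_comm (v a b : Int) (ha : 0 < a) (hb : 0 < b) :
    PySem.Int.floordiv (PySem.Int.floordiv v a) b
      = PySem.Int.floordiv (PySem.Int.floordiv v b) a := by
  simp only [PySem.Int.floordiv_eq_ediv_of_pos ha, PySem.Int.floordiv_eq_ediv_of_pos hb]
  rw [Int.ediv_ediv_of_nonneg ha.le, Int.ediv_ediv_of_nonneg hb.le, Int.mul_comm]

-- B's closed form satisfies A's halving recurrence
theorem pyCount_step (v t : Int) (ht : 0 ≤ t) (hv : t < v) :
    pyCount v t = pyCount (PySem.Int.floordiv v 2) t + 1 := by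
  have ht1 : (0:Int) < t + 1 := by omega
  have h2pos : (0:Int) < 2 := by norm_num
  have hn1 : 1 ≤ PySem.Int.floordiv v (t + 1) := by
    rw [PySem.Int.le_floordiv_iff_mul_le ht1]; omega
  rw [pyCount, if_neg (by omega : ¬ v ≤ t), pyCount]
  by_cases h2 : PySem.Int.floordiv v 2 ≤ t
  · rw [if_pos h2]
    have hvlt : v < 2 * (t + 1) := by
      have := (PySem.Int.floordiv_lt_iff_lt_mul h2pos (a := v) (q := t + 1)).mp (by omega)
      omega
    have hlt : PySem.Int.floordiv v (t + 1) < 2 := by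
      rw [PySem.Int.floordiv_lt_iff_lt_mul ht1]; omega
    have hone : PySem.Int.floordiv v (t + 1) = 1 := by omega
    rw [hone]; norm_num [show PySem.Int.bitLength 1 = 1 from by decide]
  · rw [if_neg h2]
    have hpos : 0 < PySem.Int.floordiv v (t + 1) := by omega
    rw [PySem.Int.bitLength_of_pos hpos, pv_floordiv_comm v (t + 1) 2 ht1 h2pos]
    push_cast; ring

-- the loop computes the sum of the two per-dimension closed forms
theorem cmLoop_eq (fuel : Nat) :
    ∀ (p q : Nat) (x y bx by_ moves : Int),
      (x ≤ bx ∨ (0 ≤ bx ∧ x < (bx + 1) * 2 ^ p)) →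
      (y ≤ by_ ∨ (0 ≤ by_ ∧ y < (by_ + 1) * 2 ^ q)) →
      p + q ≤ fuel →
      cmLoop fuel x y bx by_ moves = moves + pyCount x bx + pyCount y by_ := by
  induction fuel with
  | zero =>
    intro p q x y bx by_ moves hx hy hf
    have hp : p = 0 := by omega
    have hq : q = 0 := by omega
    subst hp; subst hq
    have hx' : x ≤ bx := by rcases hx with h | ⟨_, h⟩ <;> [exact h; omega]
    have hy' : y ≤ by_ := by rcases hy with h | ⟨_, h⟩ <;> [exact h; omega]
    simp [cmLoop, pyCount, hx', hy']
  | succ fuel ih =>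
    intro p q x y bx by_ moves hx hy hf
    by_cases hxc : x > bx
    · have hx' : 0 ≤ bx ∧ x < (bx + 1) * 2 ^ p := by
        rcases hx with h | h; · omega
        · exact h
      obtain ⟨hbx, hxb⟩ := hx'
      have hp : p ≠ 0 := by
        intro h; subst h; simp at hxb; omega
      obtain ⟨p', rfl⟩ := Nat.exists_eq_succ_of_ne_zero hp
      have hhalf : PySem.Int.floordiv x 2 < (bx + 1) * 2 ^ p' := by
        rw [PySem.Int.floordiv_lt_iff_lt_mul (by norm_num : (0:Int) < 2)]
        rw [pow_succ, ← mul_assoc] at hxb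
        omega
      have := ih p' q (PySem.Int.floordiv x 2) y bx by_ (moves + 1)
        (Or.inr ⟨hbx, hhalf⟩) hy (by omega)
      simp only [cmLoop, if_pos (Or.inl hxc), if_pos hxc, this]
      rw [pyCount_step x bx hbx hxc]
      ring
    · by_cases hyc : y > by_
      · have hy' : 0 ≤ by_ ∧ y < (by_ + 1) * 2 ^ q := by
          rcases hy with h | h; · omega
          · exact h
        obtain ⟨hby, hyb⟩ := hy'
        have hq : q ≠ 0 := by
          intro h; subst h; simp at hyb; omega
        obtain ⟨q', rfl⟩ := Nat.exists_eq_succ_of_ne_zero hq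
        have hhalf : PySem.Int.floordiv y 2 < (by_ + 1) * 2 ^ q' := by
          rw [PySem.Int.floordiv_lt_iff_lt_mul (by norm_num : (0:Int) < 2)]
          rw [pow_succ, ← mul_assoc] at hyb
          omega
        have := ih p q' x (PySem.Int.floordiv y 2) bx by_ (moves + 1)
          hx (Or.inr ⟨hby, hhalf⟩) (by omega)
        simp only [cmLoop, if_pos (Or.inr hyc), if_neg hxc, this]
        rw [pyCount_step y by_ hby hyc]
        ring
      · simp only [not_lt] at hxc hyc
        simp [cmLoop, pyCount, hxc, hyc, not_lt.mpr hxc, not_lt.mpr hyc]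

theorem fit32 (v t : Int) (hv : v ≤ 2147483648) (ht : 0 ≤ t ∨ v ≤ t) :
    v ≤ t ∨ (0 ≤ t ∧ v < (t + 1) * 2 ^ 32) := by
  rcases ht with ht | hle
  · right
    refine ⟨ht, ?_⟩
    have h1 : (1:Int) ≤ t + 1 := by omega
    have : (1:Int) * 2 ^ 32 ≤ (t + 1) * 2 ^ 32 :=
      mul_le_mul_of_nonneg_right h1 (by positivity)
    norm_num at this ⊢
    omega
  · exact Or.inl hle

-- ===== VERDICT (by name: the statement is the Claim_ definition above) =====
theorem carpetBox_spec : Claim_equal_carpetBox := by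
  intro a b c d hdom hpre
  unfold Spec_carpetBox carpetBox carpetBox_alt countMovesToFit
  simp only [Dom_carpetBox, pvDomInt, Bool.and_eq_true, decide_eq_true_eq] at hdom
  obtain ⟨⟨⟨ha, hb⟩, hc⟩, hd⟩ := hdom
  obtain ⟨hc', hd'⟩ := hpre
  have h1 := cmLoop_eq 128 32 32 a b c d 0
    (fit32 a c ha.2 (by tauto)) (fit32 b d hb.2 (by tauto)) (by norm_num)
  have h2 := cmLoop_eq 128 32 32 b a c d 0
    (fit32 b c hb.2 (by tauto)) (fit32 a d ha.2 (by tauto)) (by norm_num)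
  rw [h1, h2]
  ring_nf
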